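-- pv_equiv track=rewrite | github.com/YunjiJung0105/Programmers | Python3/level2/(BFS) 숫자 변환하기.py | solution
-- ===== SOURCE A (Python) =====
-- from collections import deque
--
-- def solution(x, y, n):
--     queue = deque()
--     queue.append((x,0))
--     visited = set()
--
--     while queue:
--         now, step = queue.popleft()
--
--         if now == y:
--             return step
--
--         if now > y or now in visited:   # 필요!!
--             continue
--         visited.add(now)
--
--         for i in [now*3, now*2, now+n]:
--             if i <= y and i not in visited:  # 여기서 같은 숫자가 여러번 append될 수 있음
--                 queue.append((i,step+1))
--
--     return -1
-- ===== SOURCE B (Python) =====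
-- def solution(x, y, n):
--     dp = {x: 0} if x <= y else {}
--     for v in range(x, y):
--         d = dp.get(v)
--         if d is None:
--             continue
--         for w in (v * 2, v * 3, v + n):
--             if w <= y:
--                 old = dp.get(w)
--                 if old is None or old > d + 1:
--                     dp[w] = d + 1
--     return dp.get(y, -1)
-- ===== Notes on version B (the rewrite author's own statement) =====
-- stated objective: alternative
-- what changed: Replaces the BFS (a deque of (value,step) pairs with a visited set, popped level by level) by a bottom-up dynamic program: a distance dict seeded with dp[x]=0 and one increasing-order relaxation pass v = x..y-1 over the three successors, valid because all operations are value-nondecreasing on the admitted domain; no queue and no visited set remain.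
-- outside the precondition, e.g. on solution(-1, 8, 10): A returns 2, B returns -1; on solution(3, 8, -1): A returns 3, B returns -1
import Mathlib
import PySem

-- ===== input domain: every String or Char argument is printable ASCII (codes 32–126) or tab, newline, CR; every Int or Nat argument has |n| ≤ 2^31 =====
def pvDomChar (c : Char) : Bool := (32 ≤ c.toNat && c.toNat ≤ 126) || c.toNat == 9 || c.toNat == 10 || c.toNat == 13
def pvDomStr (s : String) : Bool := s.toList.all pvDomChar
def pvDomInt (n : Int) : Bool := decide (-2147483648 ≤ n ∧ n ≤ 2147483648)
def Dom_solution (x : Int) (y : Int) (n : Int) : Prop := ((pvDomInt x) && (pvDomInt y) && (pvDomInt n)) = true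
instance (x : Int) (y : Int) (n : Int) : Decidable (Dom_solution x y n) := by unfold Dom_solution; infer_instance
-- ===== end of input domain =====

-- B replaces A's BFS (deque of (value, step) pairs with a visited set) by a bottom-up
-- dynamic program: one increasing-order relaxation pass over a distance dict; equal
-- return value on Pre_.

-- ===== PORT A =====
-- the while-queue loop of A; fuel only makes the recursion total, it is provably
-- sufficient on Pre_ (queue pops ≤ 1 + 3·|[x,y]|).
def solAux (y n : Int) : Nat → List (Int × Int) → PySem.Set Int → Int
  | 0, _, _ => -1
  | _ + 1, [], _ => -1
  | f + 1, (now, step) :: rest, visited =>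
    if now = y then step
    else if now > y || PySem.Set.contains visited now then solAux y n f rest visited
    else
      let visited' := PySem.Set.add visited now
      solAux y n f
        (rest ++ ([now * 3, now * 2, now + n].filter
            (fun i => decide (i ≤ y) && !(PySem.Set.contains visited' i))).map
            (fun i => (i, step + 1)))
        visited'

def solution (x : Int) (y : Int) (n : Int) : Int :=
  solAux y n (3 * (y + 1 - x).toNat + 2) [(x, 0)] PySem.Set.empty

-- ===== PORT B =====
-- 'if w <= y: relax dp[w] with d+1' — one relaxation of B's inner loop
def relax (y : Int) (d : Int) (dp : PySem.Dict Int Int) (w : Int) : PySem.Dict Int Int :=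
  if w ≤ y then
    match PySem.Dict.get? dp w with
    | none => PySem.Dict.insert dp w (d + 1)
    | some old => if old > d + 1 then PySem.Dict.insert dp w (d + 1) else dp
  else dp

-- one iteration of B's outer loop (value v): skip if unreached, else relax successors
def dpStep (y n : Int) (dp : PySem.Dict Int Int) (v : Int) : PySem.Dict Int Int :=
  match PySem.Dict.get? dp v with
  | none => dp
  | some d => [v * 2, v * 3, v + n].foldl (relax y d) dp

def solution_alt (x : Int) (y : Int) (n : Int) : Int :=
  let dp0 : PySem.Dict Int Int :=
    if x ≤ y then PySem.Dict.insert PySem.Dict.empty x 0 else PySem.Dict.empty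
  let dp := (PySem.List.pyRange x y 1).foldl (dpStep y n) dp0
  match PySem.Dict.get? dp y with
  | some d => d
  | none => -1

-- ===== PRECONDITION & SPEC =====
-- Pre_ excludes x < y with x < 0 or n < 0: there the operations are not value-monotone,
-- A's search space extends unboundedly through negative values (A diverges whenever y is
-- not reached early), and B's increasing-order relaxation is not meaningful; on such
-- inputs where A does return, B may return a different value (see cites).
def Pre_solution (x : Int) (y : Int) (n : Int) : Prop := (0 ≤ x ∧ 0 ≤ n) ∨ y ≤ x
instance (x : Int) (y : Int) (n : Int) : Decidable (Pre_solution x y n) := by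
  unfold Pre_solution; infer_instance

def pvWitness_solution : Int × Int × Int := (2, 10, 3)

def Spec_solution (x : Int) (y : Int) (n : Int) (out : Int) : Prop := out = solution_alt x y n
instance (x : Int) (y : Int) (n : Int) (out : Int) : Decidable (Spec_solution x y n out) := by
  unfold Spec_solution; infer_instance

-- ===== CLAIM (what is proved, stated in full; the proofs are below) =====
def Claim_equal_solution : Prop := ∀ (x : Int) (y : Int) (n : Int), Dom_solution x y n →
  Pre_solution x y n → Spec_solution x y n (solution x y n)

-- ===== LEMMAS AND PROOFS =====

-- the minimum of two optional distances (none = unreachable)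
def ominO : Option Nat → Option Nat → Option Nat
  | none, b => b
  | some a, none => some a
  | some a, some b => some (min a b)

-- dOpt x y n w: least number of ops from x to w through values in [x, y],
-- by recursion on the value (predecessors of w are w/2, w/3, w - n, all < w on Pre_)
def dOpt (x y n : Int) (w : Int) : Option Nat :=
  if w = x then some 0
  else if x ≤ w ∧ w ≤ y then
    (ominO
      (if h2 : (2 ∣ w ∧ x ≤ w / 2 ∧ w / 2 < w) then dOpt x y n (w / 2) else none)
      (ominO
        (if h3 : (3 ∣ w ∧ x ≤ w / 3 ∧ w / 3 < w) then dOpt x y n (w / 3) else none)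
        (if hn : (x ≤ w - n ∧ w - n < w) then dOpt x y n (w - n) else none))).map (· + 1)
  else none
termination_by (w - x).toNat
decreasing_by all_goals omega

-- successors of a set of values, and the next BFS level
def succsOf (n : Int) (D : Finset Int) : Finset Int :=
  D.biUnion (fun v => {3 * v, 2 * v, v + n})

def nextLevel (y n : Int) (F S : Finset Int) : Finset Int :=
  (succsOf n F).filter (fun w => w ≤ y ∧ w ∉ S)

-- the common specification: level-by-level search on finite sets (fuel-indexed)
def specF (y n : Int) : Nat → Finset Int → Finset Int → Int → Int
  | 0, _, _, _ => -1
  | f + 1, F, S, k =>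
    if y ∈ F then k
    else if F = ∅ then -1
    else specF y n f (nextLevel y n F S) (S ∪ nextLevel y n F S) (k + 1)

-- fuel budget shared by the specF / solAux recursions
def fsCond (x y : Int) (F S : Finset Int) (fS : Nat) : Prop :=
  1 ≤ fS ∧ (F ≠ ∅ → (Finset.Icc x y \ S).card + 2 ≤ fS)

-- the right-hand side A's loop is proved equal to
def rhsA (y n : Int) (F S : Finset Int) (k : Int) (fS : Nat) : Int :=
  if y ∈ F then k else specF y n fS F S k

-- mid-level invariant of A's loop relative to the spec state (F,S,k):
-- l1 = remaining level-k queue values, l2 = accumulated level-(k+1) values,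
-- D = processed level-k values, vis = A's visited set.
structure InvA (x y n : Int) (vis : PySem.Set Int) (F S D : Finset Int)
    (l1 l2 : List Int) : Prop where
  hvis : ∀ v : Int, PySem.Set.contains vis v = true ↔ v ∈ (S \ F) ∪ D
  hDF : D ⊆ F
  hFD : F ⊆ D ∪ l1.toFinset
  hl1 : ∀ v ∈ l1, v ∈ S
  hlow : nextLevel y n D S ⊆ l2.toFinset
  hup : ∀ w ∈ l2, w ∈ succsOf n D ∧ w ≤ y ∧ w ∉ S \ F
  hFS : F ⊆ S
  hSIcc : S ⊆ Finset.Icc x y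
  hyS : y ∉ S \ F
  hyD : y ∉ D

lemma mem_succsOf {n u : Int} {D : Finset Int} :
    u ∈ succsOf n D ↔ ∃ v ∈ D, u = 3 * v ∨ u = 2 * v ∨ u = v + n := by
  simp [succsOf]

lemma mem_nextLevel {y n u : Int} {F S : Finset Int} :
    u ∈ nextLevel y n F S ↔
      (∃ v ∈ F, u = 3 * v ∨ u = 2 * v ∨ u = v + n) ∧ u ≤ y ∧ u ∉ S := by
  simp [nextLevel, mem_succsOf]

lemma nextLevel_subset_Icc (x y n : Int) (hx : 0 ≤ x) (hn : 0 ≤ n)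
    {F S : Finset Int} (hF : F ⊆ Finset.Icc x y) :
    nextLevel y n F S ⊆ Finset.Icc x y := by
  intro w hw
  rcases mem_nextLevel.1 hw with ⟨⟨v, hv, hcase⟩, hle, -⟩
  have hvIcc := hF hv
  rw [Finset.mem_Icc] at hvIcc ⊢
  rcases hcase with h | h | h <;> subst h <;> constructor <;> nlinarith [hvIcc.1, hvIcc.2]

lemma card_drop {x y : Int} {S L : Finset Int} (hL : L ⊆ Finset.Icc x y)
    (hdisj : ∀ u ∈ L, u ∉ S) (hne : L ≠ ∅) :
    (Finset.Icc x y \ (S ∪ L)).card + 1 ≤ (Finset.Icc x y \ S).card := by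
  rcases Finset.nonempty_iff_ne_empty.2 hne with ⟨w, hw⟩
  have hss : Finset.Icc x y \ (S ∪ L) ⊂ Finset.Icc x y \ S := by
    constructor
    · intro u hu
      rw [Finset.mem_sdiff] at hu ⊢
      exact ⟨hu.1, fun h => hu.2 (Finset.mem_union_left _ h)⟩
    · intro hsub
      have hwmem : w ∈ Finset.Icc x y \ S := Finset.mem_sdiff.2 ⟨hL hw, hdisj w hw⟩
      have := hsub hwmem
      rw [Finset.mem_sdiff] at this
      exact this.2 (Finset.mem_union_right _ hw)
  exact Finset.card_lt_card hss

-- terminal case: empty queue means the spec answers -1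
lemma terminal_case (x y n : Int) {vis : PySem.Set Int} {F S D : Finset Int} {k : Int}
    {fS : Nat} (inv : InvA x y n vis F S D [] []) (hfs : fsCond x y F S fS) :
    rhsA y n F S k fS = -1 := by
  obtain ⟨g, rfl⟩ : ∃ g, fS = g + 1 := ⟨fS - 1, by have := hfs.1; omega⟩
  have hFD : F = D := by
    apply Finset.Subset.antisymm
    · intro u hu
      rcases Finset.mem_union.1 (inv.hFD hu) with h | h
      · exact h
      · simp at h
    · exact inv.hDF
  have hyF : y ∉ F := fun h => inv.hyD (hFD ▸ h)
  rw [rhsA, if_neg hyF]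
  by_cases hF : F = ∅
  · subst hF
    rw [specF, if_neg hyF, if_pos rfl]
  · have hg : 1 ≤ g := by have := hfs.2 hF; omega
    obtain ⟨g', rfl⟩ : ∃ g', g = g' + 1 := ⟨g - 1, by omega⟩
    have hLnil : nextLevel y n F S = ∅ := by
      apply Finset.eq_empty_of_forall_notMem
      intro u hu
      have := inv.hlow (hFD ▸ hu)
      simp at this
    rw [specF, if_neg hyF, if_neg hF, hLnil, specF]
    simp

lemma nextLevel_nil_left (y n : Int) (S0 : Finset Int) :
    nextLevel y n (∅ : Finset Int) S0 = ∅ := by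
  ext u; simp [mem_nextLevel]

lemma nextLevel_insert (y n v : Int) (T S0 : Finset Int) :
    nextLevel y n (insert v T) S0 = nextLevel y n {v} S0 ∪ nextLevel y n T S0 := by
  ext u
  simp only [mem_nextLevel, Finset.mem_union, Finset.mem_insert, Finset.mem_singleton]
  constructor
  · rintro ⟨⟨w, hw | hw, hc⟩, hy, hS⟩
    · exact Or.inl ⟨⟨w, hw, hc⟩, hy, hS⟩
    · exact Or.inr ⟨⟨w, hw, hc⟩, hy, hS⟩
  · rintro (⟨⟨w, hw, hc⟩, hy, hS⟩ | ⟨⟨w, hw, hc⟩, hy, hS⟩)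
    · exact ⟨⟨w, Or.inl hw, hc⟩, hy, hS⟩
    · exact ⟨⟨w, Or.inr hw, hc⟩, hy, hS⟩

lemma solAux_cons (y n : Int) (f : Nat) (now step : Int) (rest : List (Int × Int))
    (vis : PySem.Set Int) :
    solAux y n (f + 1) ((now, step) :: rest) vis =
      if now = y then step
      else if now > y || PySem.Set.contains vis now then solAux y n f rest vis
      else solAux y n f
        (rest ++ ([now * 3, now * 2, now + n].filter
            (fun i => decide (i ≤ y) && !(PySem.Set.contains (PySem.Set.add vis now) i))).map
            (fun i => (i, step + 1)))
        (PySem.Set.add vis now) := rfl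

lemma card_insert_drop {x y v : Int} {X : Finset Int} (hv : v ∈ Finset.Icc x y)
    (hvX : v ∉ X) :
    (Finset.Icc x y \ insert v X).card + 1 = (Finset.Icc x y \ X).card := by
  have he : Finset.Icc x y \ insert v X = (Finset.Icc x y \ X).erase v := by
    ext u
    simp only [Finset.mem_sdiff, Finset.mem_erase, Finset.mem_insert]
    tauto
  have hmem : v ∈ Finset.Icc x y \ X := Finset.mem_sdiff.2 ⟨hv, hvX⟩
  rw [he, Finset.card_erase_of_mem hmem]
  have : 0 < (Finset.Icc x y \ X).card := Finset.card_pos.2 ⟨v, hmem⟩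
  omega

-- one pop of A's queue, given the induction hypothesis at fuel f
lemma popStep (x y n : Int) (hx : 0 ≤ x) (hn : 0 ≤ n) (f : Nat)
    (IH : ∀ (vis : PySem.Set Int) (F S D : Finset Int) (k : Int) (l1 l2 : List Int)
      (fS : Nat),
      InvA x y n vis F S D l1 l2 →
      l1.length + l2.length + 3 * (Finset.Icc x y \ ((S \ F) ∪ D)).card ≤ f →
      fsCond x y F S fS →
      solAux y n f (l1.map (fun v => (v, k)) ++ l2.map (fun v => (v, k + 1))) vis
        = rhsA y n F S k fS) :
    ∀ (vis : PySem.Set Int) (F S D : Finset Int) (k v : Int) (l1' l2 : List Int) (fS : Nat),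
    InvA x y n vis F S D (v :: l1') l2 →
    (v :: l1').length + l2.length + 3 * (Finset.Icc x y \ ((S \ F) ∪ D)).card ≤ f + 1 →
    fsCond x y F S fS →
    solAux y n (f + 1) ((v :: l1').map (fun u => (u, k)) ++ l2.map (fun u => (u, k + 1))) vis
      = rhsA y n F S k fS := by
  intro vis F S D k v l1' l2 fS inv hfuel hfs
  have hvS : v ∈ S := inv.hl1 v (by simp)
  have hvy : v ≤ y := (Finset.mem_Icc.1 (inv.hSIcc hvS)).2
  rw [List.map_cons, List.cons_append, solAux_cons]
  by_cases hveq : v = y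
  · rw [if_pos hveq]
    have hyF : y ∈ F := by
      rcases Finset.mem_union.1 ((Finset.mem_union_left _ (hveq ▸ hvS) : (y:Int) ∈ S ∪ F)) with h | h
      · by_contra hyF
        exact inv.hyS (Finset.mem_sdiff.2 ⟨hveq ▸ hvS, hyF⟩)
      · exact h
    rw [rhsA, if_pos hyF]
  · rw [if_neg hveq]
    have hgt : (decide (v > y) : Bool) = false := by simp; omega
    by_cases hvis : PySem.Set.contains vis v = true
    · rw [if_pos (by rw [hgt, hvis]; rfl)]
      apply IH vis F S D k l1' l2 fS ?_ (by simp at hfuel ⊢; omega) hfs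
      refine ⟨inv.hvis, inv.hDF, ?_, fun u hu => inv.hl1 u (by simp [hu]),
        inv.hlow, inv.hup, inv.hFS, inv.hSIcc, inv.hyS, inv.hyD⟩
      intro u hu
      rcases Finset.mem_union.1 (inv.hFD hu) with h | h
      · exact Finset.mem_union_left _ h
      · rw [List.mem_toFinset, List.mem_cons] at h
        rcases h with rfl | h
        · -- u = v : v ∈ F, v visited ⇒ v ∈ D
          rcases Finset.mem_union.1 ((inv.hvis u).1 hvis) with h' | h'
          · exact absurd hu (Finset.mem_sdiff.1 h').2
          · exact Finset.mem_union_left _ h'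
        · exact Finset.mem_union_right _ (List.mem_toFinset.2 h)
    · rw [if_neg (by rw [hgt, Bool.eq_false_iff.2 hvis]; simp)]
      -- v is expanded
      have hvF : v ∈ F := by
        have hvnot : v ∉ (S \ F) ∪ D := fun h => hvis ((inv.hvis v).2 h)
        by_contra hc
        exact hvnot (Finset.mem_union_left _ (Finset.mem_sdiff.2 ⟨hvS, hc⟩))
      have hvD : v ∉ D := fun h => hvis ((inv.hvis v).2 (Finset.mem_union_right _ h))
      set addVals := [v * 3, v * 2, v + n].filter
        (fun i => decide (i ≤ y) && !(PySem.Set.contains (PySem.Set.add vis v) i)) with haddVals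
      have hcontAdd : ∀ u : Int, (PySem.Set.contains (PySem.Set.add vis v) u = true)
          ↔ u ∈ (S \ F) ∪ insert v D := by
        intro u
        rw [PySem.Set.contains_iff, PySem.Set.mem_add]
        constructor
        · rintro (h | rfl)
          · have := (inv.hvis u).1 ((PySem.Set.contains_iff _ _).2 h)
            simp only [Finset.mem_union, Finset.mem_insert] at this ⊢
            tauto
          · simp
        · intro h
          simp only [Finset.mem_union, Finset.mem_insert] at h
          rcases h with h | rfl | h
          · exact Or.inl ((PySem.Set.contains_iff _ _).1
              ((inv.hvis u).2 (Finset.mem_union_left _ h)))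
          · exact Or.inr rfl
          · exact Or.inl ((PySem.Set.contains_iff _ _).1
              ((inv.hvis u).2 (Finset.mem_union_right _ h)))
      have hmemAdd : ∀ w : Int, w ∈ addVals ↔
          (w = v * 3 ∨ w = v * 2 ∨ w = v + n) ∧ w ≤ y ∧ w ∉ (S \ F) ∪ insert v D := by
        intro w
        rw [haddVals, List.mem_filter]
        have hcontains := hcontAdd w
        simp only [List.mem_cons, List.not_mem_nil, or_false, Bool.and_eq_true,
          decide_eq_true_eq, Bool.not_eq_true', ← Bool.not_eq_true, hcontains]
      rw [List.append_assoc, ← List.map_append]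
      apply IH (PySem.Set.add vis v) F S (insert v D) k l1' (l2 ++ addVals) fS ?_ ?_ hfs
      · refine ⟨hcontAdd, Finset.insert_subset_iff.2 ⟨hvF, inv.hDF⟩, ?_,
          fun u hu => inv.hl1 u (by simp [hu]), ?_, ?_, inv.hFS, inv.hSIcc, inv.hyS, ?_⟩
        · intro u hu
          rcases Finset.mem_union.1 (inv.hFD hu) with h | h
          · exact Finset.mem_union_left _ (Finset.mem_insert_of_mem h)
          · rw [List.mem_toFinset, List.mem_cons] at h
            rcases h with rfl | h
            · exact Finset.mem_union_left _ (Finset.mem_insert_self _ _)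
            · exact Finset.mem_union_right _ (List.mem_toFinset.2 h)
        · intro w hw
          rw [nextLevel_insert] at hw
          rw [List.toFinset_append, Finset.mem_union]
          rcases Finset.mem_union.1 hw with h | h
          · right
            rcases mem_nextLevel.1 h with ⟨⟨w', hw', hforms⟩, hwy, hwS⟩
            rw [Finset.mem_singleton] at hw'
            subst w'
            rw [List.mem_toFinset, hmemAdd w]
            have hwD : w ∉ D := fun hc => hwS (inv.hFS (inv.hDF hc))
            have hwv : w ≠ v := fun hc => hwS (hc ▸ hvS)
            refine ⟨?_, hwy, ?_⟩
            · rcases hforms with rfl | rfl | rfl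
              exacts [Or.inl (by ring), Or.inr (Or.inl (by ring)), Or.inr (Or.inr rfl)]
            · simp only [Finset.mem_union, Finset.mem_insert, Finset.mem_sdiff]
              push_neg
              exact ⟨fun hc => absurd hc hwS, hwv, hwD⟩
          · exact Or.inl (inv.hlow h)
        · intro w hw
          rcases List.mem_append.1 hw with h | h
          · obtain ⟨hsucc, hwy, hwSF⟩ := inv.hup w h
            refine ⟨?_, hwy, hwSF⟩
            rcases mem_succsOf.1 hsucc with ⟨w', hw', hc⟩
            exact mem_succsOf.2 ⟨w', Finset.mem_insert_of_mem hw', hc⟩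
          · obtain ⟨hforms, hwy, hwnot⟩ := (hmemAdd w).1 h
            refine ⟨?_, hwy, fun hc => hwnot (Finset.mem_union_left _ hc)⟩
            refine mem_succsOf.2 ⟨v, Finset.mem_insert_self _ _, ?_⟩
            rcases hforms with rfl | rfl | rfl
            exacts [Or.inl (by ring), Or.inr (Or.inl (by ring)), Or.inr (Or.inr rfl)]
        · simp only [Finset.mem_insert]
          push_neg
          exact ⟨fun hc => hveq hc.symm, inv.hyD⟩
      · -- fuel
        have hlenAdd : addVals.length ≤ 3 := by
          rw [haddVals]; exact le_trans (List.length_filter_le _ _) (by simp)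
        have hvIcc : v ∈ Finset.Icc x y := inv.hSIcc hvS
        have hvX : v ∉ (S \ F) ∪ D := fun h => hvis ((inv.hvis v).2 h)
        have hcard := card_insert_drop hvIcc hvX
        have hins : (S \ F) ∪ insert v D = insert v ((S \ F) ∪ D) := by
          ext u; simp [Finset.mem_insert]
        rw [hins]
        simp only [List.length_cons, List.length_append] at hfuel ⊢
        omega

-- A's loop equals rhsA (the big simulation)
lemma runA_eq_rhs (x y n : Int) (hx : 0 ≤ x) (hn : 0 ≤ n) :
    ∀ (fA : Nat) (vis : PySem.Set Int) (F S D : Finset Int) (k : Int) (l1 l2 : List Int)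
      (fS : Nat),
    InvA x y n vis F S D l1 l2 →
    l1.length + l2.length + 3 * (Finset.Icc x y \ ((S \ F) ∪ D)).card ≤ fA →
    fsCond x y F S fS →
    solAux y n fA (l1.map (fun v => (v, k)) ++ l2.map (fun v => (v, k + 1))) vis
      = rhsA y n F S k fS := by
  intro fA
  induction fA with
  | zero =>
    intro vis F S D k l1 l2 fS inv hfuel hfs
    have hl1 : l1 = [] := List.length_eq_zero_iff.1 (by omega)
    have hl2 : l2 = [] := List.length_eq_zero_iff.1 (by omega)
    subst hl1; subst hl2
    simp only [List.map_nil, List.append_nil]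
    rw [show solAux y n 0 [] vis = -1 from rfl, terminal_case x y n inv hfs]
  | succ f ih =>
    intro vis F S D k l1 l2 fS inv hfuel hfs
    cases l1 with
    | cons v l1' => exact popStep x y n hx hn f ih vis F S D k v l1' l2 fS inv hfuel hfs
    | nil =>
      cases l2 with
      | nil =>
        simp only [List.map_nil, List.append_nil]
        rw [show solAux y n (f + 1) [] vis = -1 from rfl, terminal_case x y n inv hfs]
      | cons w l2' =>
        have hFD : F = D := by
          apply Finset.Subset.antisymm
          · intro u hu
            rcases Finset.mem_union.1 (inv.hFD hu) with h | h
            · exact h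
            · simp at h
          · exact inv.hDF
        have hyF : y ∉ F := fun h => inv.hyD (hFD ▸ h)
        have hFne : F ≠ ∅ := by
          obtain ⟨hsucc, -, -⟩ := inv.hup w (by simp)
          rcases mem_succsOf.1 hsucc with ⟨v', hv', -⟩
          exact Finset.ne_empty_of_mem (hFD ▸ hv' : v' ∈ F)
        obtain ⟨g, rfl⟩ : ∃ g, fS = g + 1 := ⟨fS - 1, by have := hfs.1; omega⟩
        have hg : 1 ≤ g := by have := hfs.2 hFne; omega
        set L := nextLevel y n F S with hL
        set S' := S ∪ L with hS'
        have hLdisj : ∀ u ∈ L, u ∉ S := fun u hu => (mem_nextLevel.1 hu).2.2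
        have hLIcc : L ⊆ Finset.Icc x y := nextLevel_subset_Icc x y n hx hn
          (Finset.Subset.trans inv.hFS inv.hSIcc)
        have hset1 : ∀ u : Int, u ∈ (S' \ L) ∪ (∅ : Finset Int) ↔ u ∈ (S \ F) ∪ D := by
          intro u
          simp only [Finset.union_empty, Finset.mem_sdiff, hS', Finset.mem_union]
          constructor
          · rintro ⟨h | h, hnL⟩
            · by_cases hF : u ∈ F
              · exact Or.inr (hFD ▸ hF)
              · exact Or.inl ⟨h, hF⟩
            · exact absurd h hnL
          · rintro (h | h)
            · have hu := h.1
              exact ⟨Or.inl hu, fun hc => hLdisj u hc hu⟩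
            · have hu : u ∈ S := inv.hFS (hFD ▸ h)
              exact ⟨Or.inl hu, fun hc => hLdisj u hc hu⟩
        have hsetEq : (S' \ L) ∪ (∅ : Finset Int) = (S \ F) ∪ D :=
          Finset.ext fun u => hset1 u
        have inv' : InvA x y n vis L S' ∅ (w :: l2') [] := by
          refine ⟨fun u => Iff.trans (inv.hvis u) (hset1 u).symm,
            Finset.empty_subset _, ?_, ?_, ?_, by simp, Finset.subset_union_right,
            Finset.union_subset inv.hSIcc hLIcc, ?_, by simp⟩
          · intro u hu
            refine Finset.mem_union_right _ ?_
            have : nextLevel y n D S ⊆ (w :: l2').toFinset := inv.hlow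
            exact this (hFD ▸ hu)
          · intro u hu
            obtain ⟨hsucc, hy', hnSF⟩ := inv.hup u hu
            by_cases hS : u ∈ S
            · exact Finset.mem_union_left _ hS
            · refine Finset.mem_union_right _ ?_
              rw [hL]
              refine mem_nextLevel.2 ⟨?_, hy', hS⟩
              rcases mem_succsOf.1 hsucc with ⟨v', hv', hc⟩
              exact ⟨v', hFD ▸ hv', hc⟩
          · rw [nextLevel_nil_left]
            exact Finset.empty_subset _
          · intro hc
            rcases Finset.mem_sdiff.1 hc with ⟨hyS', hyL⟩
            rcases Finset.mem_union.1 hyS' with h | h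
            · exact hyF (by
                by_contra hyF'
                exact inv.hyS (Finset.mem_sdiff.2 ⟨h, hyF'⟩))
            · exact hyL h
        have hrhs : rhsA y n F S k (g + 1) = rhsA y n L S' (k + 1) g := by
          rw [rhsA, if_neg hyF, specF, if_neg hyF, if_neg hFne, rhsA, ← hL, ← hS']
          by_cases hyL : y ∈ L
          · rw [if_pos hyL]
            obtain ⟨g', rfl⟩ : ∃ g', g = g' + 1 := ⟨g - 1, by omega⟩
            rw [specF, if_pos hyL]
          · rw [if_neg hyL]
        rw [List.map_nil, List.nil_append, hrhs]
        have := popStep x y n hx hn f ih vis L S' ∅ (k + 1) w l2' [] g inv'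
          (by
            have h2 : (Finset.Icc x y \ ((S' \ L) ∪ (∅ : Finset Int))).card
                = (Finset.Icc x y \ ((S \ F) ∪ D)).card := by rw [hsetEq]
            simp only [List.length_cons, List.length_nil] at hfuel ⊢
            omega)
          ⟨by omega, fun hLne => by
            have h1 := card_drop hLIcc hLdisj hLne
            have h2 := hfs.2 hFne
            rw [hS']
            omega⟩
        simpa using this

-- ============== B side: the DP computes dOpt, the BFS levels are dOpt's level sets ====

lemma ominO_eq_some (a b : Option Nat) (m : Nat) (h : ominO a b = some m) :
    a = some m ∨ b = some m := by
  cases a <;> cases b <;> simp_all [ominO] <;> omega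

lemma ominO_le_left (a b : Option Nat) (v : Nat) (h : a = some v) :
    ∃ m, ominO a b = some m ∧ m ≤ v := by
  subst h; cases b <;> simp [ominO] <;> omega

lemma ominO_le_right (a b : Option Nat) (v : Nat) (h : b = some v) :
    ∃ m, ominO a b = some m ∧ m ≤ v := by
  subst h; cases a <;> simp [ominO] <;> omega

lemma dOpt_self (x y n : Int) : dOpt x y n x = some 0 := by rw [dOpt]; simp

-- only x has distance 0
lemma dite_eq_some_imp {C : Prop} [Decidable C] {e : Option Nat} {m : Nat}
    (h : (if _h : C then e else none) = some m) : C ∧ e = some m := by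
  by_cases hC : C
  · exact ⟨hC, by rwa [dif_pos hC] at h⟩
  · rw [dif_neg hC] at h
    cases h

lemma dOpt_zero_iff (x y n w : Int) : dOpt x y n w = some 0 ↔ w = x := by
  constructor
  · intro h
    by_contra hwx
    rw [dOpt, if_neg hwx] at h
    by_cases hr : x ≤ w ∧ w ≤ y
    · rw [if_pos hr] at h
      obtain ⟨t, -, ht⟩ := Option.map_eq_some_iff.1 h
      simp at ht
    · rw [if_neg hr] at h
      cases h
  · rintro rfl; exact dOpt_self _ _ _

-- an in-range predecessor bounds the distance
lemma dOpt_pred_le (x y n : Int) (p w : Int) (hp : x ≤ p) (hpw : p < w) (hwy : w ≤ y)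
    (hedge : w = p * 2 ∨ w = p * 3 ∨ w = p + n) (j : Nat) (hj : dOpt x y n p = some j) :
    ∃ m, dOpt x y n w = some m ∧ m ≤ j + 1 := by
  have hwx : w ≠ x := by omega
  rw [dOpt, if_neg hwx, if_pos (by omega : x ≤ w ∧ w ≤ y)]
  rcases hedge with rfl | rfl | rfl
  · have hdiv : p * 2 / 2 = p := Int.mul_ediv_cancel p (by norm_num)
    rw [dif_pos (⟨⟨p, mul_comm p 2⟩, by omega, by omega⟩ :
        2 ∣ p * 2 ∧ x ≤ p * 2 / 2 ∧ p * 2 / 2 < p * 2), hdiv]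
    obtain ⟨m, hm, hle⟩ := ominO_le_left (dOpt x y n p) _ j hj
    exact ⟨m + 1, by rw [hm]; rfl, by omega⟩
  · have hdiv : p * 3 / 3 = p := Int.mul_ediv_cancel p (by norm_num)
    rw [dif_pos (⟨⟨p, mul_comm p 3⟩, by omega, by omega⟩ :
        3 ∣ p * 3 ∧ x ≤ p * 3 / 3 ∧ p * 3 / 3 < p * 3), hdiv]
    obtain ⟨m2, hm2, hle2⟩ := ominO_le_left (dOpt x y n p) _ j hj
    obtain ⟨m, hm, hle⟩ := ominO_le_right _ _ m2 hm2
    exact ⟨m + 1, by rw [hm]; rfl, by omega⟩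
  · have hsub : p + n - n = p := by ring
    rw [dif_pos (⟨by omega, by omega⟩ : x ≤ p + n - n ∧ p + n - n < p + n), hsub]
    obtain ⟨m2, hm2, hle2⟩ := ominO_le_right _ _ j hj
    obtain ⟨m, hm, hle⟩ := ominO_le_right _ _ m2 hm2
    exact ⟨m + 1, by rw [hm]; rfl, by omega⟩

-- a positive distance comes from a predecessor one step closer
lemma dOpt_pos_pred (x y n : Int) (w : Int) (j : Nat) (h : dOpt x y n w = some (j + 1)) :
    ∃ p, x ≤ p ∧ p < w ∧ (w = p * 2 ∨ w = p * 3 ∨ w = p + n) ∧ dOpt x y n p = some j := by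
  have hwx : w ≠ x := fun hc => by rw [hc, dOpt_self] at h; simp at h
  rw [dOpt, if_neg hwx] at h
  by_cases hr : x ≤ w ∧ w ≤ y
  · rw [if_pos hr] at h
    obtain ⟨t, ht, htj⟩ := Option.map_eq_some_iff.1 h
    have htj' : t = j := by omega
    subst htj'
    rcases ominO_eq_some _ _ _ ht with h1 | h1
    · obtain ⟨hc, h1'⟩ := dite_eq_some_imp h1
      exact ⟨w / 2, hc.2.1, hc.2.2, Or.inl (by have := Int.ediv_mul_cancel hc.1; omega), h1'⟩
    · rcases ominO_eq_some _ _ _ h1 with h2 | h2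
      · obtain ⟨hc, h2'⟩ := dite_eq_some_imp h2
        exact ⟨w / 3, hc.2.1, hc.2.2,
          Or.inr (Or.inl (by have := Int.ediv_mul_cancel hc.1; omega)), h2'⟩
      · obtain ⟨hc, h2'⟩ := dite_eq_some_imp h2
        exact ⟨w - n, hc.1, hc.2, Or.inr (Or.inr (by ring)), h2'⟩
  · rw [if_neg hr] at h
    cases h

-- level-k set of the search, characterised by dOpt
def LsetP (x y n : Int) (k : Nat) (w : Int) : Prop :=
  (x ≤ w ∧ w ≤ y) ∧ dOpt x y n w = some k

-- the heart of the correspondence: one BFS step = one dOpt level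
lemma nextLevel_char (x y n : Int) (hx : 0 ≤ x) (hn : 0 ≤ n) (k : Nat) (F S : Finset Int)
    (hF : ∀ w, w ∈ F ↔ LsetP x y n k w)
    (hS : ∀ w, w ∈ S ↔ ∃ j ≤ k, LsetP x y n j w) :
    ∀ w, w ∈ nextLevel y n F S ↔ LsetP x y n (k + 1) w := by
  intro w
  rw [mem_nextLevel]
  constructor
  · rintro ⟨⟨v, hvF, hcase⟩, hwy, hwS⟩
    obtain ⟨⟨hxv, hvy⟩, hdv⟩ := (hF v).1 hvF
    have hvw : v ≤ w := by rcases hcase with rfl | rfl | rfl <;> nlinarith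
    have hwx : x ≤ w := le_trans hxv hvw
    have hvne : v ≠ w := by
      rintro rfl
      exact hwS ((hS v).2 ⟨k, le_refl k, ⟨hxv, hvy⟩, hdv⟩)
    obtain ⟨m, hm, hmle⟩ := dOpt_pred_le x y n v w hxv (lt_of_le_of_ne hvw hvne) hwy
      (by rcases hcase with rfl | rfl | rfl
          exacts [Or.inr (Or.inl (by ring)), Or.inl (by ring), Or.inr (Or.inr rfl)]) k hdv
    have hmgt : ¬ m ≤ k := fun hc => hwS ((hS w).2 ⟨m, hc, ⟨hwx, hwy⟩, hm⟩)
    refine ⟨⟨hwx, hwy⟩, ?_⟩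
    rw [hm]
    congr 1
    omega
  · rintro ⟨⟨hwx, hwy⟩, hd⟩
    obtain ⟨p, hxp, hpw, hedge, hdp⟩ := dOpt_pos_pred x y n w k hd
    refine ⟨⟨p, (hF p).2 ⟨⟨hxp, by omega⟩, hdp⟩, ?_⟩, hwy, ?_⟩
    · rcases hedge with rfl | rfl | rfl
      exacts [Or.inr (Or.inl (by ring)), Or.inl (by ring), Or.inr (Or.inr rfl)]
    · intro hc
      obtain ⟨j, hj, -, hdj⟩ := (hS w).1 hc
      rw [hd] at hdj
      simp at hdj
      omega

-- if some level is empty, every later level is empty too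
lemma level_empty_mono (x y n : Int) (k : Nat) (hk : ∀ w, ¬ LsetP x y n k w) :
    ∀ m, k ≤ m → ∀ w, ¬ LsetP x y n m w := by
  intro m
  induction m with
  | zero =>
    intro hm w
    have h0 : k = 0 := by omega
    subst h0
    exact hk w
  | succ m ih =>
    intro hm w hw
    by_cases hkm : k = m + 1
    · exact hk w (hkm ▸ hw)
    · obtain ⟨hwr, hd⟩ := hw
      obtain ⟨p, hxp, hpw, -, hdp⟩ := dOpt_pos_pred x y n w m hd
      exact ih (by omega) p ⟨⟨hxp, le_trans (le_of_lt hpw) hwr.2⟩, hdp⟩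

-- specF on the dOpt level sets returns dOpt y (or -1 if y is unreachable)
lemma spec_eq_dOpt (x y n : Int) (hx : 0 ≤ x) (hn : 0 ≤ n) (hxy : x ≤ y) :
    ∀ (fS : Nat) (k : Nat) (F S : Finset Int),
    (∀ w, w ∈ F ↔ LsetP x y n k w) →
    (∀ w, w ∈ S ↔ ∃ j ≤ k, LsetP x y n j w) →
    (∀ j, j < k → dOpt x y n y ≠ some j) →
    fsCond x y F S fS →
    specF y n fS F S (k : Int) =
      (match dOpt x y n y with | some m => (m : Int) | none => -1) := by
  intro fS
  induction fS with
  | zero => intro k F S hF hS hy hfs; exact absurd hfs.1 (by norm_num)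
  | succ f ih =>
    intro k F S hF hS hy hfs
    rw [specF]
    by_cases hyF : y ∈ F
    · rw [if_pos hyF, ((hF y).1 hyF).2]
    · rw [if_neg hyF]
      have hyk : dOpt x y n y ≠ some k := fun hc =>
        hyF ((hF y).2 ⟨⟨hxy, le_refl y⟩, hc⟩)
      have hy' : ∀ j, j < k + 1 → dOpt x y n y ≠ some j := by
        intro j hj
        by_cases hjk : j = k
        · exact hjk ▸ hyk
        · exact hy j (by omega)
      by_cases hFe : F = ∅
      · rw [if_pos hFe]
        cases hd : dOpt x y n y with
        | none => rfl
        | some m =>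
          exfalso
          have hmk : k ≤ m := by
            by_contra hc
            exact hy m (by omega) hd
          have hke : ∀ w, ¬ LsetP x y n k w := by
            intro w hw
            have hmem := (hF w).2 hw
            rw [hFe] at hmem
            simp at hmem
          exact level_empty_mono x y n k hke m hmk y ⟨⟨hxy, le_refl y⟩, hd⟩
      · rw [if_neg hFe]
        have hF' := nextLevel_char x y n hx hn k F S hF hS
        have hS' : ∀ w, w ∈ S ∪ nextLevel y n F S ↔ ∃ j ≤ k + 1, LsetP x y n j w := by
          intro w
          rw [Finset.mem_union, hS w, hF' w]
          constructor
          · rintro (⟨j, hj, h⟩ | h)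
            · exact ⟨j, by omega, h⟩
            · exact ⟨k + 1, le_refl _, h⟩
          · rintro ⟨j, hj, h⟩
            by_cases hjk : j = k + 1
            · exact Or.inr (hjk ▸ h)
            · exact Or.inl ⟨j, by omega, h⟩
        have hcast : (k : Int) + 1 = ((k + 1 : Nat) : Int) := by push_cast; ring
        rw [hcast]
        apply ih (k + 1) _ _ hF' hS' hy'
        constructor
        · have := hfs.2 hFe; omega
        · intro hne
          have hLsub : nextLevel y n F S ⊆ Finset.Icc x y := by
            intro u hu
            rw [Finset.mem_Icc]
            exact ((hF' u).1 hu).1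
          have hdisj : ∀ u ∈ nextLevel y n F S, u ∉ S := by
            intro u hu hc
            obtain ⟨j, hj, -, hdj⟩ := (hS u).1 hc
            have hu' := ((hF' u).1 hu).2
            rw [hu'] at hdj
            simp at hdj
            omega
          have h1 := card_drop hLsub hdisj hne
          have h2 := hfs.2 hFe
          omega

-- ======= the DP loop computes dOpt =======

-- expected dp entry for w once all values < v have been processed
def Mval (x y n : Int) (v w : Int) : Option Nat :=
  if w = x then some 0
  else if x ≤ w ∧ w ≤ y then
    (ominO
      (if (2 ∣ w ∧ x ≤ w / 2 ∧ w / 2 < w) ∧ w / 2 < v then dOpt x y n (w / 2) else none)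
      (ominO
        (if (3 ∣ w ∧ x ≤ w / 3 ∧ w / 3 < w) ∧ w / 3 < v then dOpt x y n (w / 3) else none)
        (if (x ≤ w - n ∧ w - n < w) ∧ w - n < v then dOpt x y n (w - n) else none))).map (· + 1)
  else none

-- once v has passed w, the dp entry is final
lemma Mval_of_le (x y n v w : Int) (hwv : w ≤ v) : Mval x y n v w = dOpt x y n w := by
  rw [Mval]
  conv_rhs => rw [dOpt]
  simp only [dite_eq_ite]
  split_ifs <;> first | rfl | omega

-- one slot of Mval: either the guard p < v just admitted p = a, or nothing changed
lemma slot_cases (C : Prop) [Decidable C] (p a : Int) (e : Option Nat) :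
    (p = a ∧ C ∧ (if C ∧ p < a + 1 then e else none) = e
      ∧ (if C ∧ p < a then e else none) = none)
    ∨ (if C ∧ p < a + 1 then e else none) = (if C ∧ p < a then e else none) := by
  by_cases hpa : p = a
  · subst hpa
    by_cases hC : C
    · exact Or.inl ⟨rfl, hC, if_pos ⟨hC, by omega⟩, if_neg (fun h => absurd h.2 (by omega))⟩
    · right
      rw [if_neg (fun h => hC h.1), if_neg (fun h => hC h.1)]
  · right
    have hiff : (C ∧ p < a + 1) ↔ (C ∧ p < a) := by
      constructor <;> rintro ⟨h1', h2'⟩ <;> exact ⟨h1', by omega⟩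
    rw [if_congr hiff rfl rfl]

-- merging one new candidate c into a three-slot minimum
lemma ominO_update3 (s1 s2 s3 t1 t2 t3 : Option Nat) (c : Nat)
    (h1 : (s1 = none ∧ t1 = some c) ∨ t1 = s1)
    (h2 : (s2 = none ∧ t2 = some c) ∨ t2 = s2)
    (h3 : (s3 = none ∧ t3 = some c) ∨ t3 = s3)
    (ha : t1 = some c ∨ t2 = some c ∨ t3 = some c) :
    ominO t1 (ominO t2 t3) = ominO (ominO s1 (ominO s2 s3)) (some c) := by
  rcases h1 with ⟨rfl, rfl⟩ | rfl <;> rcases h2 with ⟨rfl, rfl⟩ | rfl <;>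
    rcases h3 with ⟨rfl, rfl⟩ | rfl <;>
    rcases ha with h | h | h <;> (try subst h) <;>
    (try cases t1) <;> (try cases t2) <;> (try cases t3) <;>
    first | (simp [ominO]; omega) | simp [ominO]

-- Nat- and Int-level merge of a new candidate into an optional running minimum
def mergeN : Option Nat → Nat → Option Nat
  | none, c => some c
  | some o, c => some (min o c)

def mergeI : Option Int → Int → Option Int
  | none, c => some c
  | some o, c => some (min o c)

lemma mergeI_merge (o : Option Int) (c : Int) : mergeI (mergeI o c) c = mergeI o c := by
  cases o <;> simp [mergeI] <;> omega

lemma ominO_some_map (S : Option Nat) (c : Nat) :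
    (ominO S (some c)).map (· + 1) = mergeN (S.map (· + 1)) (c + 1) := by
  cases S <;> simp [ominO, mergeN] <;> omega

-- no value was processed: the dp table is unchanged
lemma Mval_succ_none (x y n a w : Int) (hga : dOpt x y n a = none) :
    Mval x y n (a + 1) w = Mval x y n a w := by
  rw [Mval, Mval]
  by_cases hwx : w = x
  · rw [if_pos hwx, if_pos hwx]
  · rw [if_neg hwx, if_neg hwx]
    by_cases hr : x ≤ w ∧ w ≤ y
    · rw [if_pos hr, if_pos hr]
      have e1 : (if (2 ∣ w ∧ x ≤ w / 2 ∧ w / 2 < w) ∧ w / 2 < a + 1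
            then dOpt x y n (w / 2) else none)
          = (if (2 ∣ w ∧ x ≤ w / 2 ∧ w / 2 < w) ∧ w / 2 < a
            then dOpt x y n (w / 2) else none) := by
        rcases slot_cases (2 ∣ w ∧ x ≤ w / 2 ∧ w / 2 < w) (w / 2) a (dOpt x y n (w / 2))
          with ⟨hpa, -, ht, hs⟩ | heq
        · rw [ht, hs, hpa, hga]
        · exact heq
      have e2 : (if (3 ∣ w ∧ x ≤ w / 3 ∧ w / 3 < w) ∧ w / 3 < a + 1
            then dOpt x y n (w / 3) else none)
          = (if (3 ∣ w ∧ x ≤ w / 3 ∧ w / 3 < w) ∧ w / 3 < a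
            then dOpt x y n (w / 3) else none) := by
        rcases slot_cases (3 ∣ w ∧ x ≤ w / 3 ∧ w / 3 < w) (w / 3) a (dOpt x y n (w / 3))
          with ⟨hpa, -, ht, hs⟩ | heq
        · rw [ht, hs, hpa, hga]
        · exact heq
      have e3 : (if (x ≤ w - n ∧ w - n < w) ∧ w - n < a + 1
            then dOpt x y n (w - n) else none)
          = (if (x ≤ w - n ∧ w - n < w) ∧ w - n < a
            then dOpt x y n (w - n) else none) := by
        rcases slot_cases (x ≤ w - n ∧ w - n < w) (w - n) a (dOpt x y n (w - n))
          with ⟨hpa, -, ht, hs⟩ | heq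
        · rw [ht, hs, hpa, hga]
        · exact heq
      rw [e1, e2, e3]
    · rw [if_neg hr, if_neg hr]

-- w is not a (≤ y) successor of a: the dp entry for w is unchanged
lemma Mval_unchanged (x y n a w : Int)
    (hno : ¬ ((w = a * 2 ∨ w = a * 3 ∨ w = a + n) ∧ w ≤ y)) :
    Mval x y n (a + 1) w = Mval x y n a w := by
  rw [Mval, Mval]
  by_cases hwx : w = x
  · rw [if_pos hwx, if_pos hwx]
  · rw [if_neg hwx, if_neg hwx]
    by_cases hr : x ≤ w ∧ w ≤ y
    · rw [if_pos hr, if_pos hr]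
      have e1 : (if (2 ∣ w ∧ x ≤ w / 2 ∧ w / 2 < w) ∧ w / 2 < a + 1
            then dOpt x y n (w / 2) else none)
          = (if (2 ∣ w ∧ x ≤ w / 2 ∧ w / 2 < w) ∧ w / 2 < a
            then dOpt x y n (w / 2) else none) := by
        rcases slot_cases (2 ∣ w ∧ x ≤ w / 2 ∧ w / 2 < w) (w / 2) a (dOpt x y n (w / 2))
          with ⟨hpa, hC, -, -⟩ | heq
        · exfalso
          have hc2 := Int.ediv_mul_cancel hC.1
          rw [hpa] at hc2
          exact hno ⟨Or.inl (by omega), hr.2⟩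
        · exact heq
      have e2 : (if (3 ∣ w ∧ x ≤ w / 3 ∧ w / 3 < w) ∧ w / 3 < a + 1
            then dOpt x y n (w / 3) else none)
          = (if (3 ∣ w ∧ x ≤ w / 3 ∧ w / 3 < w) ∧ w / 3 < a
            then dOpt x y n (w / 3) else none) := by
        rcases slot_cases (3 ∣ w ∧ x ≤ w / 3 ∧ w / 3 < w) (w / 3) a (dOpt x y n (w / 3))
          with ⟨hpa, hC, -, -⟩ | heq
        · exfalso
          have hc3 := Int.ediv_mul_cancel hC.1
          rw [hpa] at hc3
          exact hno ⟨Or.inr (Or.inl (by omega)), hr.2⟩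
        · exact heq
      have e3 : (if (x ≤ w - n ∧ w - n < w) ∧ w - n < a + 1
            then dOpt x y n (w - n) else none)
          = (if (x ≤ w - n ∧ w - n < w) ∧ w - n < a
            then dOpt x y n (w - n) else none) := by
        rcases slot_cases (x ≤ w - n ∧ w - n < w) (w - n) a (dOpt x y n (w - n))
          with ⟨hpa, hC, -, -⟩ | heq
        · exact absurd ⟨Or.inr (Or.inr (by omega)), hr.2⟩ hno
        · exact heq
      rw [e1, e2, e3]
    · rw [if_neg hr, if_neg hr]

-- w is a fresh (≤ y) successor of the processed value a: merge the candidate dOpt a + 1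
lemma Mval_succ_merge (x y n a w : Int) (hx : 0 ≤ x) (hn : 0 ≤ n) (hxa : x ≤ a)
    (dnat : Nat) (hga : dOpt x y n a = some dnat)
    (hmem : w = a * 2 ∨ w = a * 3 ∨ w = a + n) (hwy : w ≤ y) (hwa : w ≠ a) :
    Mval x y n (a + 1) w = mergeN (Mval x y n a w) (dnat + 1) := by
  have haw : a < w := by rcases hmem with rfl | rfl | rfl <;> omega
  have hwx : w ≠ x := by omega
  have hr : x ≤ w ∧ w ≤ y := ⟨by omega, hwy⟩
  rw [Mval, Mval, if_neg hwx, if_neg hwx, if_pos hr, if_pos hr]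
  have hup : ominO
      (if (2 ∣ w ∧ x ≤ w / 2 ∧ w / 2 < w) ∧ w / 2 < a + 1 then dOpt x y n (w / 2) else none)
      (ominO
        (if (3 ∣ w ∧ x ≤ w / 3 ∧ w / 3 < w) ∧ w / 3 < a + 1 then dOpt x y n (w / 3) else none)
        (if (x ≤ w - n ∧ w - n < w) ∧ w - n < a + 1 then dOpt x y n (w - n) else none))
      = ominO (ominO
          (if (2 ∣ w ∧ x ≤ w / 2 ∧ w / 2 < w) ∧ w / 2 < a then dOpt x y n (w / 2) else none)
          (ominO
            (if (3 ∣ w ∧ x ≤ w / 3 ∧ w / 3 < w) ∧ w / 3 < a then dOpt x y n (w / 3) else none)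
            (if (x ≤ w - n ∧ w - n < w) ∧ w - n < a then dOpt x y n (w - n) else none)))
          (some dnat) := by
    apply ominO_update3
    · rcases slot_cases (2 ∣ w ∧ x ≤ w / 2 ∧ w / 2 < w) (w / 2) a (dOpt x y n (w / 2))
        with ⟨hpa, -, ht, hs⟩ | heq
      · exact Or.inl ⟨hs, by rw [ht, hpa, hga]⟩
      · exact Or.inr heq
    · rcases slot_cases (3 ∣ w ∧ x ≤ w / 3 ∧ w / 3 < w) (w / 3) a (dOpt x y n (w / 3))
        with ⟨hpa, -, ht, hs⟩ | heq
      · exact Or.inl ⟨hs, by rw [ht, hpa, hga]⟩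
      · exact Or.inr heq
    · rcases slot_cases (x ≤ w - n ∧ w - n < w) (w - n) a (dOpt x y n (w - n))
        with ⟨hpa, -, ht, hs⟩ | heq
      · exact Or.inl ⟨hs, by rw [ht, hpa, hga]⟩
      · exact Or.inr heq
    · rcases hmem with rfl | rfl | rfl
      · left
        have hdiv : a * 2 / 2 = a := Int.mul_ediv_cancel a (by norm_num)
        rw [if_pos ⟨⟨⟨a, mul_comm a 2⟩, by omega, by omega⟩, by omega⟩, hdiv, hga]
      · right; left
        have hdiv : a * 3 / 3 = a := Int.mul_ediv_cancel a (by norm_num)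
        rw [if_pos ⟨⟨⟨a, mul_comm a 3⟩, by omega, by omega⟩, by omega⟩, hdiv, hga]
      · right; right
        have hsub : a + n - n = a := by ring
        rw [if_pos ⟨⟨by omega, by omega⟩, by omega⟩, hsub, hga]
  rw [hup, ominO_some_map]

lemma relax_get_single (y d : Int) (dp : PySem.Dict Int Int) (w' w : Int) :
    PySem.Dict.get? (relax y d dp w') w =
      if w = w' ∧ w ≤ y then mergeI (PySem.Dict.get? dp w) (d + 1)
      else PySem.Dict.get? dp w := by
  rw [relax]
  by_cases hwy' : w' ≤ y
  · rw [if_pos hwy']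
    cases hg : PySem.Dict.get? dp w' with
    | none =>
      show PySem.Dict.get? (PySem.Dict.insert dp w' (d + 1)) w = _
      rw [PySem.Dict.get?_insert]
      by_cases hww : w = w'
      · subst hww
        rw [if_pos rfl, if_pos ⟨rfl, hwy'⟩, hg]
        rfl
      · rw [if_neg hww, if_neg (fun h => hww h.1)]
    | some old =>
      show (if old > d + 1 then PySem.Dict.insert dp w' (d + 1) else dp).get? w = _
      by_cases hold : old > d + 1
      · rw [if_pos hold, PySem.Dict.get?_insert]
        by_cases hww : w = w'
        · subst hww
          rw [if_pos rfl, if_pos ⟨rfl, hwy'⟩, hg]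
          show some (d + 1) = some (min old (d + 1))
          congr 1
          omega
        · rw [if_neg hww, if_neg (fun h => hww h.1)]
      · rw [if_neg hold]
        by_cases hww : w = w'
        · subst hww
          rw [if_pos ⟨rfl, hwy'⟩, hg]
          show some old = some (min old (d + 1))
          congr 1
          omega
        · rw [if_neg (fun h => hww h.1)]
  · rw [if_neg hwy', if_neg (fun h : w = w' ∧ w ≤ y => hwy' (h.1 ▸ h.2))]

lemma relax_fold_get (y d : Int) (ws : List Int) : ∀ (dp : PySem.Dict Int Int) (w : Int),
    PySem.Dict.get? (ws.foldl (relax y d) dp) w =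
      if w ∈ ws ∧ w ≤ y then mergeI (PySem.Dict.get? dp w) (d + 1)
      else PySem.Dict.get? dp w := by
  induction ws with
  | nil => intro dp w; simp
  | cons v ws ih =>
    intro dp w
    rw [List.foldl_cons, ih, relax_get_single]
    split_ifs with h1 h2 h3 h3 h2 h3 h3 <;>
      first
        | rfl
        | exact mergeI_merge _ _
        | (exfalso; simp only [List.mem_cons] at *; tauto)

-- processing one value keeps the dp table at its expected contents
lemma dpStep_inv (x y n : Int) (hx : 0 ≤ x) (hn : 0 ≤ n) (hxy : x ≤ y) (a : Int)
    (hxa : x ≤ a) (dp : PySem.Dict Int Int)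
    (hdp : ∀ w, PySem.Dict.get? dp w = (Mval x y n a w).map (fun t => (t : Int))) :
    ∀ w, PySem.Dict.get? (dpStep y n dp a) w
      = (Mval x y n (a + 1) w).map (fun t => (t : Int)) := by
  intro w
  have hda : PySem.Dict.get? dp a = (dOpt x y n a).map (fun t => (t : Int)) := by
    rw [hdp a, Mval_of_le x y n a a (le_refl a)]
  rw [dpStep]
  cases hga : dOpt x y n a with
  | none =>
    rw [hda, hga]
    show PySem.Dict.get? dp w = _
    rw [hdp w, Mval_succ_none x y n a w hga]
  | some dnat =>
    rw [hda, hga]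
    show PySem.Dict.get? ([a * 2, a * 3, a + n].foldl (relax y ((dnat : Int))) dp) w = _
    rw [relax_fold_get]
    by_cases hcase : w ∈ [a * 2, a * 3, a + n] ∧ w ≤ y
    · rw [if_pos hcase, hdp w]
      obtain ⟨hmem, hwy⟩ := hcase
      have hmem' : w = a * 2 ∨ w = a * 3 ∨ w = a + n := by
        simpa using hmem
      by_cases hwa : w = a
      · have he1 : Mval x y n (a + 1) w = dOpt x y n w :=
          Mval_of_le x y n (a + 1) w (by omega)
        have he2 : Mval x y n a w = dOpt x y n w :=
          Mval_of_le x y n a w (by omega)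
        rw [he1, he2, hwa, hga]
        show mergeI (some ((dnat : Int))) ((dnat : Int) + 1) = some ((dnat : Int))
        show some (min ((dnat : Int)) ((dnat : Int) + 1)) = some ((dnat : Int))
        congr 1
        omega
      · rw [Mval_succ_merge x y n a w hx hn hxa dnat hga hmem' hwy hwa]
        cases hM : Mval x y n a w with
        | none =>
          show some (((dnat : Int)) + 1) = some (((dnat + 1 : Nat) : Int))
          congr 1
        | some m =>
          show some (min ((m : Int)) ((dnat : Int) + 1)) = some (((min m (dnat + 1) : Nat) : Int))
          congr 1
          push_cast
          omega
    · have hun : Mval x y n (a + 1) w = Mval x y n a w := by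
        apply Mval_unchanged
        intro hc
        exact hcase ⟨by simpa using hc.1, hc.2⟩
      rw [if_neg hcase, hdp w, hun]

-- running the DP loop from a up to y completes the table
lemma dpLoop (x y n : Int) (hx : 0 ≤ x) (hn : 0 ≤ n) (hxy : x ≤ y) :
    ∀ (m : Nat) (a : Int) (dp : PySem.Dict Int Int), a = y - (m : Int) → x ≤ a →
    (∀ w, PySem.Dict.get? dp w = (Mval x y n a w).map (fun t => (t : Int))) →
    ∀ w, PySem.Dict.get? ((PySem.List.pyRange a y 1).foldl (dpStep y n) dp) w
      = (Mval x y n y w).map (fun t => (t : Int)) := by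
  intro m
  induction m with
  | zero =>
    intro a dp ha hxa hdp w
    have hay : a = y := by omega
    subst hay
    rw [PySem.List.pyRange_one_eq_nil (le_refl a)]
    exact hdp w
  | succ m ih =>
    intro a dp ha hxa hdp w
    have hay : a < y := by omega
    rw [PySem.List.pyRange_one_cons hay, List.foldl_cons]
    exact ih (a + 1) (dpStep y n dp a) (by omega) (by omega)
      (dpStep_inv x y n hx hn hxy a hxa dp hdp) w

-- the initial dict {x: 0} matches Mval at v = x
lemma dp0_inv (x y n : Int) (hxy : x ≤ y) (w : Int) :
    PySem.Dict.get? (PySem.Dict.insert (PySem.Dict.empty : PySem.Dict Int Int) x 0) w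
      = (Mval x y n x w).map (fun t => (t : Int)) := by
  by_cases hwx : w = x
  · subst hwx
    rw [PySem.Dict.get?_insert_self, Mval, if_pos rfl]
    rfl
  · rw [PySem.Dict.get?_insert_of_ne _ _ hwx, PySem.Dict.get?_empty, Mval, if_neg hwx]
    split_ifs <;> first | rfl | omega

-- B's program equals dOpt y  (x ≤ y case)
lemma solution_alt_eq_dOpt (x y n : Int) (hx : 0 ≤ x) (hn : 0 ≤ n) (hxy : x ≤ y) :
    solution_alt x y n = (match dOpt x y n y with | some m => (m : Int) | none => -1) := by
  rw [solution_alt]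
  simp only [if_pos hxy]
  have hrun := dpLoop x y n hx hn hxy (y - x).toNat x
    (PySem.Dict.insert PySem.Dict.empty x 0) (by omega) (le_refl x)
    (dp0_inv x y n hxy) y
  rw [hrun, Mval_of_le x y n y y (le_refl y)]
  cases dOpt x y n y <;> rfl

-- ===== VERDICT (by name: the statement is the Claim_ definition above) =====
theorem solution_spec : Claim_equal_solution := by
  intro x y n hdom hpre
  unfold Spec_solution
  by_cases hne : x = y
  · subst hne
    have hA0 : solution x x n = 0 := by
      rw [solution]
      have h1 : (x + 1 - x).toNat = 1 := by omega
      rw [h1]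
      show solAux x n (4 + 1) [(x, 0)] PySem.Set.empty = 0
      rw [solAux_cons, if_pos rfl]
    have hB0 : solution_alt x x n = 0 := by
      rw [solution_alt]
      simp only [if_pos (le_refl x), PySem.List.pyRange_one_eq_nil (le_refl x), List.foldl_nil]
      rw [PySem.Dict.get?_insert_self]
    rw [hA0, hB0]
  · by_cases hgt : y < x
    · have hB1 : solution_alt x y n = -1 := by
        rw [solution_alt]
        simp only [if_neg (by omega : ¬ x ≤ y), PySem.List.pyRange_one_eq_nil (by omega : y ≤ x),
          List.foldl_nil]
        rw [PySem.Dict.get?_empty]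
      have ht : (y + 1 - x).toNat = 0 := by omega
      rw [hB1, solution, ht]
      show solAux y n (1 + 1) [(x, 0)] PySem.Set.empty = -1
      rw [solAux_cons, if_neg hne,
        if_pos (by simp [PySem.Set.empty]; omega)]
      rfl
    · have hxy : x < y := by omega
      have hx : 0 ≤ x ∧ 0 ≤ n := by
        rcases hpre with h | h
        · exact h
        · omega
      set c := (Finset.Icc x y \ ({x} : Finset Int)).card with hc
      have hIcc : ({x} : Finset Int) ⊆ Finset.Icc x y := by
        intro u hu
        rw [Finset.mem_singleton] at hu
        subst hu
        rw [Finset.mem_Icc]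
        omega
      have hyx : y ∉ ({x} : Finset Int) := by
        rw [Finset.mem_singleton]
        omega
      have hA : solution x y n = rhsA y n {x} {x} 0 (c + 2) := by
        rw [solution]
        have inv0 : InvA x y n PySem.Set.empty {x} {x} ∅ [x] [] := by
          refine ⟨?_, Finset.empty_subset _, by simp, by simp, ?_, by simp,
            Finset.Subset.refl _, hIcc, by simp, by simp⟩
          · intro u
            constructor
            · intro h
              simp [PySem.Set.empty, PySem.Set.contains] at h
            · intro h
              simp at h
          · rw [nextLevel_nil_left]
            exact Finset.empty_subset _
        have hfuel : ([x] : List Int).length + ([] : List Int).length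
            + 3 * (Finset.Icc x y \ ((({x} : Finset Int) \ {x}) ∪ ∅)).card
            ≤ 3 * (y + 1 - x).toNat + 2 := by
          have hcard : (Finset.Icc x y).card = (y + 1 - x).toNat := Int.card_Icc x y
          simp only [List.length_cons, List.length_nil, Finset.sdiff_self,
            Finset.empty_union, Finset.sdiff_empty]
          omega
        have hrun := runA_eq_rhs x y n hx.1 hx.2 (3 * (y + 1 - x).toNat + 2)
          PySem.Set.empty {x} {x} ∅ 0 [x] [] (c + 2) inv0 hfuel
          ⟨by omega, fun _ => by omega⟩
        simpa using hrun
      have hF0 : ∀ w, w ∈ ({x} : Finset Int) ↔ LsetP x y n 0 w := by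
        intro w
        rw [Finset.mem_singleton]
        constructor
        · rintro rfl
          exact ⟨⟨le_refl _, by omega⟩, dOpt_self _ _ _⟩
        · rintro ⟨-, hd⟩
          exact (dOpt_zero_iff x y n w).1 hd
      have hS0 : ∀ w, w ∈ ({x} : Finset Int) ↔ ∃ j ≤ 0, LsetP x y n j w := by
        intro w
        rw [hF0 w]
        constructor
        · exact fun h => ⟨0, le_refl 0, h⟩
        · rintro ⟨j, hj, h⟩
          have hj0 : j = 0 := by omega
          exact hj0 ▸ h
      have hspec := spec_eq_dOpt x y n hx.1 hx.2 (by omega) (c + 2) 0 {x} {x} hF0 hS0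
        (by intro j hj; omega) ⟨by omega, fun _ => by omega⟩
      rw [Nat.cast_zero] at hspec
      rw [hA, rhsA, if_neg hyx, hspec,
        solution_alt_eq_dOpt x y n hx.1 hx.2 (by omega)]
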